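-- pv_equiv track=rewrite | github.com/koliskos/AI_Class | lab0.py | compute_string_properties
-- ===== SOURCE A (Python) =====
-- def compute_string_properties(string):
--     """Given a string of lowercase letters, returns a tuple containing the
--     following three elements:
--         0. The length of the string
--         1. A list of all the characters in the string (including duplicates, if
--            any), sorted in REVERSE alphabetical order
--         2. The number of distinct characters in the string (hint: use a set)
--     """
--
--     sortedList = [lett for lett in string]
--     dictLett = []
--     occurences = 0
--     for lett in string:
--         if lett not in dictLett:
--             dictLett.append(lett)
--             occurences +=1
--
--     tupToReturn = (len(string), sorted(sortedList, reverse=True), occurences)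
--     return tupToReturn
-- ===== SOURCE B (Python) =====
-- def compute_string_properties(string):
--     counts = {}
--     for ch in string:
--         counts[ch] = counts.get(ch, 0) + 1
--     rev_sorted = []
--     for ch in sorted(counts, reverse=True):
--         rev_sorted += [ch] * counts[ch]
--     return (len(string), rev_sorted, len(counts))
-- ===== Notes on version B (the rewrite author's own statement) =====
-- stated objective: alternative
-- what changed: Replaces the full-list sort plus quadratic membership-scan dedup with one frequency-table pass: distinct count = number of keys, and the reverse-sorted list is rebuilt counting-sort style by sorting only the distinct keys descending and expanding each by its count.
import Mathlib
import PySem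

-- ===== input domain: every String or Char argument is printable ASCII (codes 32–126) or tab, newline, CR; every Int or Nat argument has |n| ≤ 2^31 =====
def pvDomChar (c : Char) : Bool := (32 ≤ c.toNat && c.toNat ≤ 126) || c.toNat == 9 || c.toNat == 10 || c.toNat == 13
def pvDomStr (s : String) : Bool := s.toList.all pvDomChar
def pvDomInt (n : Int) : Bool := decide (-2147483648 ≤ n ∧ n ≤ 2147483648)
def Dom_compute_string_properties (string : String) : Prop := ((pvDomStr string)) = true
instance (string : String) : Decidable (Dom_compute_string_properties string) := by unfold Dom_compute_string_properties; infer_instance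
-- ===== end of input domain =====

-- B replaces the full-list sort and the quadratic membership-scan dedup by one frequency
-- table: distinct count = number of keys, reverse-sorted list = keys sorted descending,
-- each expanded by its count (counting-sort style). Objective: alternative algorithm.

-- ===== PORT A =====
def compute_string_properties (string : String) : Int × List String × Int :=
  -- sortedList = [lett for lett in string]  (Python chars are 1-char strings)
  let sortedList : List String := string.toList.map (fun c => String.ofList [c])
  -- for lett in string: if lett not in dictLett: dictLett.append(lett); occurences += 1
  let st : List String × Int :=
    (string.toList.map (fun c => String.ofList [c])).foldl
      (fun st lett => if lett ∈ st.1 then st else (st.1 ++ [lett], st.2 + 1)) ([], 0)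
  (PySem.Str.len string, PySem.List.sorted sortedList (fun x => x) true, st.2)

-- ===== PORT B =====
def compute_string_properties_alt (string : String) : Int × List String × Int :=
  let chars : List String := string.toList.map (fun c => String.ofList [c])
  -- counts[ch] = counts.get(ch, 0) + 1
  let counts : PySem.Dict String Int :=
    chars.foldl (fun d ch => d.insert ch (d.getD ch 0 + 1)) PySem.Dict.empty
  -- for ch in sorted(counts, reverse=True): rev_sorted += [ch] * counts[ch]
  -- counts[ch] never raises (ch is a key) and is ≥ 1, so getD/toNat are exact here
  let revSorted : List String :=
    (PySem.List.sorted counts.keys (fun x => x) true).foldl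
      (fun acc ch => acc ++ List.replicate (counts.getD ch 0).toNat ch) []
  (PySem.Str.len string, revSorted, PySem.List.len counts.keys)

-- ===== PRECONDITION & SPEC =====
def Spec_compute_string_properties (string : String) (out : Int × List String × Int) : Prop := out = compute_string_properties_alt string
instance (string : String) (out : Int × List String × Int) : Decidable (Spec_compute_string_properties string out) := by unfold Spec_compute_string_properties; infer_instance

-- ===== CLAIM (what is proved, stated in full; the proofs are below) =====
def Claim_equal_compute_string_properties : Prop := ∀ (string : String), Dom_compute_string_properties string → Spec_compute_string_properties string (compute_string_properties string)

-- ===== LEMMAS AND PROOFS =====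

-- A's dedup loop computes (PySem.Set.ofList-style fold, its length)
lemma a_loop_inv (xs : List String) : ∀ (acc : List String),
    xs.foldl (fun st lett => if lett ∈ st.1 then st else (st.1 ++ [lett], st.2 + 1))
      (acc, (acc.length : Int))
    = (xs.foldl PySem.Set.add acc, ((xs.foldl PySem.Set.add acc).length : Int)) := by
  induction xs with
  | nil => intro acc; rfl
  | cons x xs ih =>
    intro acc
    simp only [List.foldl_cons, PySem.Set.add]
    by_cases h : x ∈ acc
    · simp [h, ih acc]
    · simpa [h] using (by
        have := ih (acc ++ [x])
        simpa using this)

-- count of an element in the key-sort-and-expand list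
lemma count_flatMap_replicate (m : String → Nat) :
    ∀ (ks : List String), ks.Nodup → ∀ (a : String),
      (ks.flatMap (fun c => List.replicate (m c) c)).count a
        = if a ∈ ks then m a else 0 := by
  intro ks
  induction ks with
  | nil => intro _ a; simp
  | cons k ks ih =>
    intro hnd a
    have hk : k ∉ ks := (List.nodup_cons.mp hnd).1
    have hks := (List.nodup_cons.mp hnd).2
    simp only [List.flatMap_cons, List.count_append, List.count_replicate, ih hks a]
    by_cases hak : a = k
    · subst hak; simp [hk]
    · simp [hak, Ne.symm hak]

-- descending nodup keys expanded by counts stay pairwise ≥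
lemma pairwise_flatMap_replicate (m : String → Nat) :
    ∀ (ks : List String), ks.Pairwise (fun a b => b < a) →
      (ks.flatMap (fun c => List.replicate (m c) c)).Pairwise (fun a b => b ≤ a) := by
  intro ks
  induction ks with
  | nil => intro _; simp
  | cons k ks ih =>
    intro hp
    rw [List.flatMap_cons, List.pairwise_append]
    refine ⟨List.pairwise_replicate.mpr (Or.inr le_rfl), ih hp.of_cons, ?_⟩
    intro a ha b hb
    have hak := List.eq_of_mem_replicate ha
    obtain ⟨c, hc, hbc⟩ := List.mem_flatMap.mp hb
    have hbk := List.eq_of_mem_replicate hbc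
    subst hak; subst hbk
    exact le_of_lt (List.pairwise_cons.mp hp |>.1 _ hc)

-- the expansion is a permutation of the original character list
lemma perm_flatMap_replicate (chars ks : List String)
    (hperm : ks.Perm (PySem.Set.ofList chars)) :
    (ks.flatMap (fun c => List.replicate (chars.count c) c)).Perm chars := by
  have hnd : ks.Nodup := hperm.nodup_iff.mpr (PySem.Set.nodup_ofList chars)
  refine List.perm_iff_count.mpr (fun a => ?_)
  rw [count_flatMap_replicate (fun c => chars.count c) ks hnd a]
  by_cases ha : a ∈ ks
  · simp [ha]
  · have : a ∉ chars := by
      intro hmem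
      exact ha (hperm.mem_iff.mpr ((PySem.Set.mem_ofList chars a).mpr hmem))
    simp [ha, List.count_eq_zero.mpr this]

-- the central fact: reverse-sorting equals key-sort-and-expand
lemma sorted_rev_eq_expand (chars : List String) :
    PySem.List.sorted chars (fun x => x) true
      = (PySem.List.sorted (PySem.Set.ofList chars) (fun x => x) true).flatMap
          (fun c => List.replicate (chars.count c) c) := by
  set ks := PySem.List.sorted (PySem.Set.ofList chars) (fun x => x) true with hks
  have hkperm : ks.Perm (PySem.Set.ofList chars) := PySem.List.sorted_perm _ _ _
  have hknd : ks.Nodup := hkperm.nodup_iff.mpr (PySem.Set.nodup_ofList chars)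
  have hkdesc : ks.Pairwise (fun a b => b < a) := by
    have h1 : ks.Pairwise (fun a b : String => b ≤ a) :=
      PySem.List.sorted_pairwise_rev _ _
    have h2 : ks.Pairwise (fun a b : String => a ≠ b) := hknd
    exact (h1.and h2).imp (fun {a b} h => lt_of_le_of_ne h.1 (Ne.symm h.2))
  set E := ks.flatMap (fun c => List.replicate (chars.count c) c) with hE
  have hEperm : E.Perm chars := perm_flatMap_replicate chars ks hkperm
  have hsortperm : (PySem.List.sorted chars (fun x => x) true).Perm E :=
    (PySem.List.sorted_perm _ _ _).trans hEperm.symm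
  refine hsortperm.eq_of_pairwise (le := fun a b : String => b ≤ a)
    ?_ (PySem.List.sorted_pairwise_rev _ _) (pairwise_flatMap_replicate _ ks hkdesc)
  intro a b _ _ h1 h2
  exact le_antisymm h2 h1

-- B's counter equals Counter(chars), so its keys are the ordered distinct elements
lemma counts_eq_counter (chars : List String) :
    chars.foldl (fun d ch => d.insert ch (d.getD ch 0 + 1)) PySem.Dict.empty
      = PySem.Dict.counter chars :=
  PySem.Dict.foldl_insert_getD_add_one_eq_counter chars

-- ===== VERDICT (by name: the statement is the Claim_ definition above) =====
theorem compute_string_properties_spec : Claim_equal_compute_string_properties := by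
  intro string _
  unfold Spec_compute_string_properties compute_string_properties compute_string_properties_alt
  set chars : List String := string.toList.map (fun c => String.ofList [c]) with hchars
  simp only [counts_eq_counter chars, PySem.Dict.keys_counter]
  refine Prod.ext rfl (Prod.ext ?_ ?_)
  · -- list component
    show PySem.List.sorted chars (fun x => x) true = _
    rw [sorted_rev_eq_expand chars,
        PySem.List.foldl_append_eq_flatMap
          (fun c => List.replicate ((PySem.Dict.counter chars).getD c 0).toNat c) _ []]
    simp [PySem.Dict.getD_counter]
  · -- distinct-count component
    show (chars.foldl (fun st lett => if lett ∈ st.1 then st else (st.1 ++ [lett], st.2 + 1))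
            ([], 0)).2 = PySem.List.len (PySem.Set.ofList chars)
    have h0 := a_loop_inv chars []
    simp only [List.length_nil, Nat.cast_zero] at h0
    rw [PySem.List.len_eq, h0]
    rfl
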